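-- pv_equiv track=rewrite | github.com/VrushabBayas/Python | findMissing.py | findMissing2
-- ===== SOURCE A (Python) =====
-- import collections
--
-- def findMissing2(arr1, arr2):
--
--     d = collections.defaultdict(int)
--
--     for num in arr2:
--         d[num] += 1
--
--     for num in arr1:
--         if d[num] == 0:
--             return num
--         else:
--             d[num] -= 1
-- ===== SOURCE B (Python) =====
-- def findMissing2(arr1, arr2):
--     for i, num in enumerate(arr1):
--         if arr1[:i+1].count(num) > arr2.count(num):
--             return num
-- ===== Notes on version B (the rewrite author's own statement) =====
-- stated objective: alternative
-- what changed: Replaces A's stateful consume-from-a-count-dict scan by a stateless counting criterion: return the first arr1[i] whose occurrence count in the prefix arr1[:i+1] exceeds its total count in arr2, computed by fresh count() calls with no dict and no mutable state.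
import Mathlib
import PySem

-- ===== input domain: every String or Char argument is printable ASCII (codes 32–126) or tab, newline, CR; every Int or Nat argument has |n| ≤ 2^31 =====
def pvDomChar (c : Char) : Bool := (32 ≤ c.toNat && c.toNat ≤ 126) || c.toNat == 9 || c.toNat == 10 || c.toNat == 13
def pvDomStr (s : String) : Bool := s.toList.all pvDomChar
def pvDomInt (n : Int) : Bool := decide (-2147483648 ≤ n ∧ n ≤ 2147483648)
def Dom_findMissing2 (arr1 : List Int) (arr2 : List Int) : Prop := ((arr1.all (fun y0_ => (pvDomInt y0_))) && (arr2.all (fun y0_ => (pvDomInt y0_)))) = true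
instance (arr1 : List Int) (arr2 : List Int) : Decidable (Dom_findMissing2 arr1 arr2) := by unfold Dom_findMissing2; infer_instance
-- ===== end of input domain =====

-- B replaces A's stateful dict-consuming scan by a stateless counting criterion (first arr1[i] whose prefix count exceeds its count in arr2); alternative decomposition, not faster.
-- ===== PORT A =====
-- d = defaultdict(int); for num in arr2: d[num] += 1
-- then scan arr1: return num when d[num] == 0, else d[num] -= 1
def findMissing2Loop (d : PySem.Dict Int Int) : List Int → Option Int
  | [] => none
  | num :: rest =>
      if d.getD num 0 == 0 then some num
      else findMissing2Loop (d.insert num (d.getD num 0 - 1)) rest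

def findMissing2 (arr1 : List Int) (arr2 : List Int) : Option Int :=
  findMissing2Loop (arr2.foldl (fun d num => d.insert num (d.getD num 0 + 1)) PySem.Dict.empty) arr1

-- ===== PORT B =====
-- for i, num in enumerate(arr1): if arr1[:i+1].count(num) > arr2.count(num): return num
def findMissing2AltLoop (arr1 : List Int) (arr2 : List Int) : List (Int × Int) → Option Int
  | [] => none
  | (i, num) :: rest =>
      if (PySem.List.slice arr1 none (some (i + 1))).count num > arr2.count num then some num
      else findMissing2AltLoop arr1 arr2 rest

def findMissing2_alt (arr1 : List Int) (arr2 : List Int) : Option Int :=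
  findMissing2AltLoop arr1 arr2 (PySem.List.enumerate arr1 0)

-- ===== PRECONDITION & SPEC =====
def Spec_findMissing2 (arr1 : List Int) (arr2 : List Int) (out : Option Int) : Prop := out = findMissing2_alt arr1 arr2
instance (arr1 : List Int) (arr2 : List Int) (out : Option Int) : Decidable (Spec_findMissing2 arr1 arr2 out) := by unfold Spec_findMissing2; infer_instance

-- ===== CLAIM (what is proved, stated in full; the proofs are below) =====
def Claim_equal_findMissing2 : Prop := ∀ (arr1 : List Int) (arr2 : List Int), Dom_findMissing2 arr1 arr2 → Spec_findMissing2 arr1 arr2 (findMissing2 arr1 arr2)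

-- ===== LEMMAS AND PROOFS =====

-- Invariant: after A has consumed the prefix `pref` of arr1 without returning,
-- d[n] = count(arr2, n) - count(pref, n) and count(pref, n) ≤ count(arr2, n) for all n.
lemma loop_eq (arr2 : List Int) :
    ∀ (s pref : List Int) (arr1 : List Int) (d : PySem.Dict Int Int),
      arr1 = pref ++ s →
      (∀ n, d.getD n 0 = (arr2.count n : Int) - pref.count n) →
      (∀ n, pref.count n ≤ arr2.count n) →
      findMissing2Loop d s = findMissing2AltLoop arr1 arr2 (PySem.List.enumerate s (pref.length : Int)) := by
  intro s
  induction s with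
  | nil => intro pref arr1 d _ _ _; simp [findMissing2Loop, findMissing2AltLoop, PySem.List.enumerate_nil]
  | cons num rest ih =>
    intro pref arr1 d harr hd hle
    rw [PySem.List.enumerate_cons]
    simp only [findMissing2Loop, findMissing2AltLoop]
    have hcast : ((pref.length : Int) + 1) = ((pref.length + 1 : Nat) : Int) := by push_cast; ring
    have hslice : PySem.List.slice arr1 none (some ((pref.length : Int) + 1))
        = pref ++ [num] := by
      rw [hcast, PySem.List.slice_to_natCast, harr, List.take_append]
      simp
    have hcnt : (PySem.List.slice arr1 none (some ((pref.length : Int) + 1))).count num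
        = pref.count num + 1 := by
      rw [hslice]; simp [List.count_append]
    have hA := hd num
    by_cases h0 : (arr2.count num : Int) - pref.count num = 0
    · have hc1 : (d.getD num 0 == 0) = true := by rw [hA]; simp [h0]
      have hc2 : (PySem.List.slice arr1 none (some ((pref.length : Int) + 1))).count num > arr2.count num := by
        rw [hcnt]; omega
      rw [if_pos hc1, if_pos hc2]
    · have hlt : pref.count num < arr2.count num := by have := hle num; omega
      have hc1 : (d.getD num 0 == 0) = false := by rw [hA]; simp; omega
      have hc2 : ¬ (PySem.List.slice arr1 none (some ((pref.length : Int) + 1))).count num > arr2.count num := by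
        rw [hcnt]; omega
      rw [if_neg (by simp [hc1]), if_neg hc2]
      have hlen : ((pref.length : Int) + 1) = (((pref ++ [num]).length : Nat) : Int) := by
        simp
      rw [hlen]
      apply ih (pref ++ [num]) arr1
      · simpa using harr
      · intro n
        rw [PySem.Dict.getD_insert]
        by_cases hn : n = num
        · subst hn
          rw [if_pos rfl]
          have := hd n
          simp [List.count_append]
          omega
        · have hz : List.count n [num] = 0 := by simp [Ne.symm hn]
          rw [if_neg (by omega), hd n]
          simp [List.count_append, hz]
      · intro n
        by_cases hn : n = num
        · subst hn; simp [List.count_append]; omega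
        · have hz : List.count n [num] = 0 := by simp [Ne.symm hn]
          simpa [List.count_append, hz] using hle n

-- ===== VERDICT (by name: the statement is the Claim_ definition above) =====
theorem findMissing2_spec : Claim_equal_findMissing2 := by
  intro arr1 arr2 _
  unfold Spec_findMissing2 findMissing2 findMissing2_alt
  have := loop_eq arr2 arr1 [] arr1
      (arr2.foldl (fun d num => d.insert num (d.getD num 0 + 1)) PySem.Dict.empty)
      (by simp)
      (by intro n; rw [PySem.Dict.getD_foldl_insert_add_one]; simp)
      (by intro n; simp)
  simpa using this
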